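-- pv_equiv track=rewrite | github.com/akaBetsy/cpss | 3_process_json_to_csv.py | match_nidv_company
-- ===== SOURCE A (Python) =====
-- def extract_base_from_fqdn(fqdn: str) -> str:
--     return (fqdn or "").strip().lower().strip(".")
--
-- def match_nidv_company(fqdns: list[str], known_domains: set[str]) -> str:
--     matches = set()
--     for fqdn in fqdns or []:
--         h = extract_base_from_fqdn(fqdn).strip(".")
--         if not h:
--             continue
--         # Fast exact match
--         if h in known_domains:
--             matches.add(h)
--             continue
--         # Suffix match
--         for dom in known_domains:
--             if h.endswith("." + dom):
--                 matches.add(dom)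
--     return ";".join(sorted(matches))
-- ===== SOURCE B (Python) =====
-- def match_nidv_company(fqdns, known_domains):
--     known = set(known_domains)
--     matches = set()
--     for fqdn in fqdns or []:
--         h = (fqdn or "").strip().lower().strip(".")
--         if not h:
--             continue
--         if h in known:
--             matches.add(h)
--             continue
--         # enumerate the suffixes of h that start right after a dot and look
--         # each one up in the hash set: no scan over known_domains per host
--         for i, c in enumerate(h):
--             if c == '.':
--                 s = h[i + 1:]
--                 if s in known:
--                     matches.add(s)
--     return ";".join(sorted(matches))
-- ===== Notes on version B (the rewrite author's own statement) =====
-- stated objective: faster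
-- what changed: Instead of scanning all known_domains with endswith for every host, B enumerates the dot-suffixes of each normalized host and looks each one up in a hash set built once from known_domains.
import Mathlib
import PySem

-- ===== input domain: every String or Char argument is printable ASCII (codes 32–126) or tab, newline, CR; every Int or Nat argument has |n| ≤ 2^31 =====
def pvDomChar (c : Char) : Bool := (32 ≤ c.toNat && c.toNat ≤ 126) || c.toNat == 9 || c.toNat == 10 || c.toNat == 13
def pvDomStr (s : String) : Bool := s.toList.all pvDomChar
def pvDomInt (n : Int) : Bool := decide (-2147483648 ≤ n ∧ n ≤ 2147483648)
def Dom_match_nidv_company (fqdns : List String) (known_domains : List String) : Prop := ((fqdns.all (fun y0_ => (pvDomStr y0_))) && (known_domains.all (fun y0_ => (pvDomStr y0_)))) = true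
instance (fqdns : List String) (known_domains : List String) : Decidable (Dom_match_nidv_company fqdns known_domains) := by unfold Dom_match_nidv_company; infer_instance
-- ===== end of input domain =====

-- B replaces A's per-host scan over known_domains (one endswith test per domain) by
-- enumerating the dot-suffixes of each normalized host and looking each up in a set
-- built once from known_domains; A's exact-match short-circuit is kept.

-- ===== PORT A =====
-- extract_base_from_fqdn: (fqdn or "").strip().lower().strip(".")  ('fqdn or ""' is the identity on a str argument unless it is the empty string, which strip already maps to itself)
def extract_base_from_fqdn (fqdn : String) : String :=
  PySem.Str.stripChars (PySem.Str.lower (PySem.Str.strip fqdn)) "."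

def match_nidv_company (fqdns : List String) (known_domains : List String) : String :=
  PySem.Str.join ";" (PySem.List.sorted
    (fqdns.foldl (fun m fqdn =>
      let h := PySem.Str.stripChars (extract_base_from_fqdn fqdn) "."
      if h = "" then m
      else if known_domains.contains h then PySem.Set.add m h
      else
        -- h.endswith("." + dom) ported on the char-list side (exact for string append)
        known_domains.foldl (fun m dom =>
          if PySem.Chars.endswith h.toList ('.' :: dom.toList) then PySem.Set.add m dom else m) m)
      PySem.Set.empty)
    (fun x => x))

-- ===== PORT B =====
-- inner loop of Source B: for i, c in enumerate(h): if c == '.': s = h[i+1:]; if s in known: matches.add(s)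
def pvScan (known : PySem.Set String) : PySem.Set String → List Char → PySem.Set String
  | m, [] => m
  | m, c :: rest =>
      pvScan known
        (if c = '.' then
          (if PySem.Set.contains known (String.ofList rest) then PySem.Set.add m (String.ofList rest) else m)
        else m) rest

def match_nidv_company_alt (fqdns : List String) (known_domains : List String) : String :=
  let known : PySem.Set String := PySem.Set.ofList known_domains
  PySem.Str.join ";" (PySem.List.sorted
    (fqdns.foldl (fun m fqdn =>
      let h := PySem.Str.stripChars (PySem.Str.lower (PySem.Str.strip fqdn)) "."
      if h = "" then m
      else if PySem.Set.contains known h then PySem.Set.add m h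
      else pvScan known m h.toList)
      PySem.Set.empty)
    (fun x => x))

-- ===== PRECONDITION & SPEC =====
def Spec_match_nidv_company (fqdns : List String) (known_domains : List String) (out : String) : Prop := out = match_nidv_company_alt fqdns known_domains
instance (fqdns : List String) (known_domains : List String) (out : String) : Decidable (Spec_match_nidv_company fqdns known_domains out) := by unfold Spec_match_nidv_company; infer_instance

-- ===== CLAIM (what is proved, stated in full; the proofs are below) =====
def Claim_equal_match_nidv_company : Prop := ∀ (fqdns : List String) (known_domains : List String), Dom_match_nidv_company fqdns known_domains → Spec_match_nidv_company fqdns known_domains (match_nidv_company fqdns known_domains)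

-- ===== LEMMAS AND PROOFS =====

theorem pvDropWhile_self {α : Type} (p : α → Bool) (l : List α)
    (h : ∀ y ∈ l.head?, p y = false) : List.dropWhile p l = l := by
  cases l with
  | nil => rfl
  | cons a as => simp [h a (by simp)]

-- stripping an already end-stripped list is the identity
theorem pvTrim_idem {α : Type} (p : α → Bool) (s : List α) :
    (List.dropWhile p (List.dropWhile p
      (List.dropWhile p (List.dropWhile p s).reverse).reverse).reverse).reverse
    = (List.dropWhile p (List.dropWhile p s).reverse).reverse := by
  set u := List.dropWhile p s with hu
  set t := List.dropWhile p u.reverse with ht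
  have hth : ∀ y ∈ t.head?, p y = false := by
    intro y hy
    have := List.head?_dropWhile_not p u.reverse
    rw [← ht, hy] at this
    exact this
  have htl : ∀ y ∈ t.getLast?, p y = false := by
    intro y hy
    cases htn : t with
    | nil => rw [htn] at hy; simp at hy
    | cons a as =>
      obtain ⟨w, hw⟩ := ht ▸ List.dropWhile_suffix (l := u.reverse) (p := p)
      have h1 : t.getLast? = u.reverse.getLast? := by
        rw [← hw, List.getLast?_append, htn]
        simp [List.getLast?_cons]
      have h2 : u.reverse.getLast? = u.head? := List.getLast?_reverse
      have h3 := List.head?_dropWhile_not p s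
      rw [← hu] at h3
      rw [h1, h2] at hy
      rw [hy] at h3
      exact h3
  have step1 : List.dropWhile p t.reverse = t.reverse := by
    apply pvDropWhile_self
    intro y hy
    rw [List.head?_reverse] at hy
    exact htl y hy
  rw [step1, List.reverse_reverse, pvDropWhile_self p t hth]

theorem pvStripChars_idem (s c : List Char) :
    PySem.Chars.stripChars (PySem.Chars.stripChars s c) c = PySem.Chars.stripChars s c := by
  unfold PySem.Chars.stripChars
  exact pvTrim_idem _ s

theorem pvStrStrip_idem (s : String) :
    PySem.Str.stripChars (PySem.Str.stripChars s ".") "." = PySem.Str.stripChars s "." := by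
  unfold PySem.Str.stripChars
  rw [String.toList_ofList, pvStripChars_idem]

-- what one fqdn contributes to the match set (shared characterization)
def pvHits (kd : List String) (fqdn x : String) : Prop :=
  let h := PySem.Str.stripChars (PySem.Str.lower (PySem.Str.strip fqdn)) "."
  ¬ h = "" ∧ (if h ∈ kd then x = h else x ∈ kd ∧ ('.' :: x.toList) <:+ h.toList)

-- generic: membership after a fold whose step satisfies a one-step characterization
theorem pvMemFold (x : String) (step : PySem.Set String → String → PySem.Set String)
    (P : String → Prop) (hstep : ∀ m f, (x ∈ step m f ↔ x ∈ m ∨ P f)) :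
    ∀ (fqdns : List String) (m : PySem.Set String),
      x ∈ fqdns.foldl step m ↔ x ∈ m ∨ ∃ f ∈ fqdns, P f := by
  intro fqdns
  induction fqdns with
  | nil => simp
  | cons f fs ih =>
    intro m
    simp only [List.foldl_cons]
    rw [ih, hstep]
    simp only [List.mem_cons]
    constructor
    · rintro ((h | h) | ⟨g, hg, hp⟩)
      · exact Or.inl h
      · exact Or.inr ⟨f, Or.inl rfl, h⟩
      · exact Or.inr ⟨g, Or.inr hg, hp⟩
    · rintro (h | ⟨g, (rfl | hg), hp⟩)
      · exact Or.inl (Or.inl h)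
      · exact Or.inl (Or.inr hp)
      · exact Or.inr ⟨g, hg, hp⟩

theorem pvNodupFold (step : PySem.Set String → String → PySem.Set String)
    (hstep : ∀ m f, m.Nodup → (step m f).Nodup) :
    ∀ (fqdns : List String) (m : PySem.Set String), m.Nodup → (fqdns.foldl step m).Nodup := by
  intro fqdns
  induction fqdns with
  | nil => exact fun m hm => hm
  | cons f fs ih =>
    intro m hm
    simp only [List.foldl_cons]
    exact ih _ (hstep m f hm)

-- membership after A's inner suffix loop
theorem pvMemInnerA (hl : List Char) (ks : List String) (m : PySem.Set String) (x : String) :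
    (x ∈ ks.foldl (fun m dom =>
        if PySem.Chars.endswith hl ('.' :: dom.toList) then PySem.Set.add m dom else m) m)
    ↔ x ∈ m ∨ (x ∈ ks ∧ PySem.Chars.endswith hl ('.' :: x.toList) = true) := by
  have := pvMemFold x
    (fun m dom => if PySem.Chars.endswith hl ('.' :: dom.toList) then PySem.Set.add m dom else m)
    (fun dom => x = dom ∧ PySem.Chars.endswith hl ('.' :: dom.toList) = true)
    (by
      intro m d
      dsimp only
      by_cases hd : PySem.Chars.endswith hl ('.' :: d.toList) = true
      · rw [if_pos hd]
        rw [PySem.Set.mem_add]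
        tauto
      · rw [if_neg hd]
        tauto)
    ks m
  rw [this]
  constructor
  · rintro (h | ⟨d, hd, rfl, he⟩) <;> tauto
  · rintro (h | ⟨h1, h2⟩)
    · tauto
    · exact Or.inr ⟨x, h1, rfl, h2⟩

-- membership after B's dot-suffix scan
theorem pvMemScan (known : PySem.Set String) (l : List Char) (m : PySem.Set String) (x : String) :
    x ∈ pvScan known m l ↔ x ∈ m ∨ (('.' :: x.toList) <:+ l ∧ x ∈ known) := by
  induction l generalizing m with
  | nil => simp [pvScan]
  | cons ch rest ih =>
    rw [pvScan, ih]
    have hsfx : (('.' :: x.toList) <:+ ch :: rest) ↔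
        (ch = '.' ∧ x = String.ofList rest) ∨ ('.' :: x.toList) <:+ rest := by
      rw [List.suffix_cons_iff]
      constructor
      · rintro (h | h)
        · obtain ⟨h1, h2⟩ := List.cons_eq_cons.mp h
          exact Or.inl ⟨h1.symm, by rw [← h2, String.ofList_toList]⟩
        · exact Or.inr h
      · rintro (⟨rfl, rfl⟩ | h)
        · exact Or.inl (by rw [String.toList_ofList])
        · exact Or.inr h
    rw [hsfx]
    by_cases hc : ch = '.'
    · subst hc
      by_cases hk : PySem.Set.contains known (String.ofList rest) = true
      · rw [if_pos rfl, if_pos hk]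
        have hkm : String.ofList rest ∈ known := List.contains_iff_mem.mp hk
        rw [PySem.Set.mem_add]
        constructor
        · rintro ((h | rfl) | h) <;> tauto
        · rintro (h | ⟨(⟨_, rfl⟩ | h1), h2⟩) <;> tauto
      · rw [if_pos rfl, if_neg hk]
        have hkm : String.ofList rest ∉ known := fun h => hk (List.contains_iff_mem.mpr h)
        constructor
        · rintro (h | h) <;> tauto
        · rintro (h | ⟨(⟨_, rfl⟩ | h1), h2⟩) <;> tauto
    · rw [if_neg hc]
      constructor
      · rintro (h | h) <;> tauto
      · rintro (h | ⟨(⟨h1, _⟩ | h1), h2⟩) <;> tauto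

-- one step of A's outer loop
theorem pvStepA (kd : List String) (x : String) (m : PySem.Set String) (f : String) :
    (x ∈ (let h := PySem.Str.stripChars (extract_base_from_fqdn f) "."
      if h = "" then m
      else if kd.contains h then PySem.Set.add m h
      else kd.foldl (fun m dom =>
        if PySem.Chars.endswith h.toList ('.' :: dom.toList) then PySem.Set.add m dom else m) m))
    ↔ x ∈ m ∨ pvHits kd f x := by
  unfold pvHits extract_base_from_fqdn
  dsimp only
  rw [pvStrStrip_idem]
  generalize PySem.Str.stripChars (PySem.Str.lower (PySem.Str.strip f)) "." = h
  simp only [List.contains_iff_mem]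
  split_ifs with h0 hk
  · tauto
  · tauto
  · rw [PySem.Set.mem_add]; tauto
  · rw [pvMemInnerA]
    simp only [PySem.Chars.endswith_iff]
    tauto

-- one step of B's outer loop
theorem pvStepB (kd : List String) (x : String) (m : PySem.Set String) (f : String) :
    (x ∈ (let h := PySem.Str.stripChars (PySem.Str.lower (PySem.Str.strip f)) "."
      if h = "" then m
      else if PySem.Set.contains (PySem.Set.ofList kd) h then PySem.Set.add m h
      else pvScan (PySem.Set.ofList kd) m h.toList))
    ↔ x ∈ m ∨ pvHits kd f x := by
  unfold pvHits
  dsimp only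
  generalize PySem.Str.stripChars (PySem.Str.lower (PySem.Str.strip f)) "." = h
  simp only [PySem.Set.contains, List.contains_iff_mem, PySem.Set.mem_ofList]
  split_ifs with h0 hk
  · tauto
  · tauto
  · rw [PySem.Set.mem_add]; tauto
  · rw [pvMemScan]
    simp only [PySem.Set.mem_ofList]
    tauto

theorem pvNodupStepA (kd : List String) (m : PySem.Set String) (f : String) (hm : m.Nodup) :
    (let h := PySem.Str.stripChars (extract_base_from_fqdn f) "."
      if h = "" then m
      else if kd.contains h then PySem.Set.add m h
      else kd.foldl (fun m dom =>
        if PySem.Chars.endswith h.toList ('.' :: dom.toList) then PySem.Set.add m dom else m) m).Nodup := by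
  dsimp only
  split
  · exact hm
  · split
    · exact PySem.Set.nodup_add _ _ hm
    · exact pvNodupFold _ (by
        intro m' d hm'
        split
        · exact PySem.Set.nodup_add _ _ hm'
        · exact hm') kd m hm

theorem pvNodupStepB (kd : List String) (m : PySem.Set String) (f : String) (hm : m.Nodup) :
    (let h := PySem.Str.stripChars (PySem.Str.lower (PySem.Str.strip f)) "."
      if h = "" then m
      else if PySem.Set.contains (PySem.Set.ofList kd) h then PySem.Set.add m h
      else pvScan (PySem.Set.ofList kd) m h.toList).Nodup := by
  dsimp only
  split
  · exact hm
  · split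
    · exact PySem.Set.nodup_add _ _ hm
    · induction (PySem.Str.stripChars (PySem.Str.lower (PySem.Str.strip f)) ".").toList
        generalizing m with
      | nil => exact hm
      | cons ch rest ih =>
        rw [pvScan]
        apply ih
        split
        · split
          · exact PySem.Set.nodup_add _ _ hm
          · exact hm
        · exact hm

-- ===== VERDICT (by name: the statement is the Claim_ definition above) =====
theorem match_nidv_company_spec : Claim_equal_match_nidv_company := by
  intro fqdns kd _
  show match_nidv_company fqdns kd = match_nidv_company_alt fqdns kd
  unfold match_nidv_company match_nidv_company_alt
  refine congrArg (PySem.Str.join ";") ?_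
  refine PySem.List.sorted_eq_sorted_of_perm _ _ _ (fun a b hab => hab) ?_
  refine (List.perm_ext_iff_of_nodup
    (pvNodupFold _ (fun m f hm => pvNodupStepA kd m f hm) fqdns _ List.nodup_nil)
    (pvNodupFold _ (fun m f hm => pvNodupStepB kd m f hm) fqdns _ List.nodup_nil)).mpr ?_
  intro x
  rw [pvMemFold x _ (fun f => pvHits kd f x) (fun m f => pvStepA kd x m f) fqdns _,
      pvMemFold x _ (fun f => pvHits kd f x) (fun m f => pvStepB kd x m f) fqdns _]
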